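-- pv_equiv track=rewrite | github.com/skchaudr/MyAPI | context_refinery/triage/writers.py | write_related_section
-- ===== SOURCE A (Python) =====
-- def write_related_section(body, related_filenames):
--     """Inject or replace a ## Related section at the bottom of the note body.
--
--     Args:
--         body: The markdown body text (without frontmatter).
--         related_filenames: List of filenames (without .md extension) to link.
--
--     Returns:
--         Updated body string with ## Related section containing [[wiki-links]].
--         If ## Related already exists, replace its content.
--     """
--     if not related_filenames:
--         return body
--
--     related_content = "## Related\n" + "\n".join(f"- [[{filename}]]" for filename in related_filenames)
--
--     # Try to find existing ## Related section
--     # Note: we should replace its content, but NOT consume preceding/following sections under different headers.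
--
--     # Let's split by lines to handle this cleanly
--     lines = body.split('\n')
--     new_lines = []
--     in_related = False
--     replaced = False
--
--     for line in lines:
--         if line.startswith("## Related"):
--             in_related = True
--             replaced = True
--             new_lines.append(related_content)
--             continue
--
--         if in_related:
--             if line.startswith("#"):
--                 # We reached another header, stop ignoring lines
--                 in_related = False
--                 new_lines.append(line)
--         else:
--             new_lines.append(line)
--
--     if not replaced:
--         # Need to append
--         if new_lines and new_lines[-1].strip() != "":
--             new_lines.append("")
--         new_lines.append(related_content)
--
--     return "\n".join(new_lines).strip() + "\n" # Add trailing newline for formatting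
-- ===== SOURCE B (Python) =====
-- def write_related_section(body, related_filenames):
--     """Inject or replace a ## Related section; recursive descent over the line list,
--     building the output front-to-back (no flag-driven scan)."""
--     if not related_filenames:
--         return body
--
--     rc = "## Related\n" + "\n".join(f"- [[{f}]]" for f in related_filenames)
--
--     def render(lines):
--         # returns (rendered lines, whether a Related header was seen)
--         if not lines:
--             return [], False
--         head, rest = lines[0], lines[1:]
--         if head.startswith("## Related"):
--             j = 0
--             while j < len(rest) and not rest[j].startswith("#"):
--                 j += 1
--             tail, _ = render(rest[j:])
--             return [rc] + tail, True
--         tail, seen = render(rest)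
--         return [head] + tail, seen
--
--     out, replaced = render(body.split('\n'))
--     if not replaced:
--         if out and out[-1].strip():
--             out = out + [""]
--         out = out + [rc]
--     return "\n".join(out).strip() + "\n"
-- ===== Notes on version B (the rewrite author's own statement) =====
-- stated objective: alternative
-- what changed: B replaces A's flag-driven foldl line scan (in_related/replaced state) with a recursive-descent render over the line list that emits output front-to-back and skips a Related block's content by jumping to the next header line.
import Mathlib
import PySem

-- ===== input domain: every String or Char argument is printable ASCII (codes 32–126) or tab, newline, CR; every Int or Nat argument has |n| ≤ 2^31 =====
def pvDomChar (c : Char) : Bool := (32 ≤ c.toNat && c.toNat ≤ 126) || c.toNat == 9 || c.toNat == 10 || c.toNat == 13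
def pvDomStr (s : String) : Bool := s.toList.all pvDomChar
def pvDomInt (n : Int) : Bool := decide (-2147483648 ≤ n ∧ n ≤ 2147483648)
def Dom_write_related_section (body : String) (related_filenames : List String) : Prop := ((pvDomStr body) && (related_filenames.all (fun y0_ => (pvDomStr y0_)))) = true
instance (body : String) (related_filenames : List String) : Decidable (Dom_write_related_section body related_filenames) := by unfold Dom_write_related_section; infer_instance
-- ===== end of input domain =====

-- B renders the note by a recursive descent over the lines (emitting front-to-back, skipping a
-- Related block by jumping to the next header) instead of A's flag-driven scan; objective: alternative.

-- ===== PORT A =====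
-- A's loop body: state = (new_lines, in_related, replaced); strings handled as List Char (PySem.Chars)
def pvStepA (rc : List Char) (st : List (List Char) × Bool × Bool) (line : List Char) :
    List (List Char) × Bool × Bool :=
  if PySem.Chars.startswith line "## Related".toList then (st.1 ++ [rc], true, true)
  else if st.2.1 then
    (if PySem.Chars.startswith line "#".toList then (st.1 ++ [line], false, st.2.2) else st)
  else (st.1 ++ [line], st.2.1, st.2.2)

def write_related_section (body : String) (related_filenames : List String) : String :=
  if related_filenames.isEmpty then body
  else
    let rc : List Char := "## Related\n".toList ++
      PySem.Chars.join "\n".toList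
        (related_filenames.map (fun f => "- [[".toList ++ f.toList ++ "]]".toList))
    let lines := PySem.Chars.splitOn body.toList "\n".toList
    let st := lines.foldl (pvStepA rc) ([], false, false)
    let new_lines :=
      if st.2.2 then st.1
      else
        (match st.1.getLast? with
         | some l => if PySem.Chars.strip l ≠ [] then st.1 ++ [[]] else st.1
         | none => st.1) ++ [rc]
    String.ofList (PySem.Chars.strip (PySem.Chars.join "\n".toList new_lines) ++ "\n".toList)

-- ===== PORT B =====
def pvNotHeader (x : List Char) : Bool := !PySem.Chars.startswith x "#".toList

-- B's recursive render: returns (rendered lines, whether a Related header was seen).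
-- The inner `while j ... rest[j:]` of Source B advances past the leading non-header lines,
-- which is exactly `rest.dropWhile pvNotHeader`.
def pvRender (rc : List Char) : List (List Char) → List (List Char) × Bool
  | [] => ([], false)
  | head :: rest =>
    if PySem.Chars.startswith head "## Related".toList then
      rc :: (pvRender rc (rest.dropWhile pvNotHeader)).1 |> (·, true)
    else
      match pvRender rc rest with
      | (tail, seen) => (head :: tail, seen)
termination_by lines => lines.length
decreasing_by
  · simpa using Nat.lt_succ_of_le (rest.length_dropWhile_le pvNotHeader)
  · simp

def write_related_section_alt (body : String) (related_filenames : List String) : String :=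
  if related_filenames.isEmpty then body
  else
    let rc : List Char := "## Related\n".toList ++
      PySem.Chars.join "\n".toList
        (related_filenames.map (fun f => "- [[".toList ++ f.toList ++ "]]".toList))
    let r := pvRender rc (PySem.Chars.splitOn body.toList "\n".toList)
    let out :=
      if r.2 then r.1
      else
        (if r.1 ≠ [] ∧ PySem.Chars.strip (r.1.getLastD []) ≠ [] then r.1 ++ [[]] else r.1) ++ [rc]
    String.ofList (PySem.Chars.strip (PySem.Chars.join "\n".toList out) ++ "\n".toList)

-- ===== PRECONDITION & SPEC =====
def Spec_write_related_section (body : String) (related_filenames : List String) (out : String) : Prop := out = write_related_section_alt body related_filenames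
instance (body : String) (related_filenames : List String) (out : String) : Decidable (Spec_write_related_section body related_filenames out) := by unfold Spec_write_related_section; infer_instance

-- ===== CLAIM (what is proved, stated in full; the proofs are below) =====
def Claim_equal_write_related_section : Prop := ∀ (body : String) (related_filenames : List String), Dom_write_related_section body related_filenames → Spec_write_related_section body related_filenames (write_related_section body related_filenames)

-- ===== LEMMAS AND PROOFS =====

-- the observable part of A's loop state: (new_lines, replaced)
def pvProj (st : List (List Char) × Bool × Bool) : List (List Char) × Bool := (st.1, st.2.2)

-- a line starting with "## Related" starts with "#"
lemma pv_rel_header (x : List Char) (h : PySem.Chars.startswith x "## Related".toList = true) :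
    PySem.Chars.startswith x "#".toList = true := by
  rw [PySem.Chars.startswith_iff] at h ⊢
  exact List.IsPrefix.trans (by decide) h

lemma pv_rel_false (x : List Char) (h : PySem.Chars.startswith x "#".toList = false) :
    PySem.Chars.startswith x "## Related".toList = false := by
  cases hr : PySem.Chars.startswith x "## Related".toList with
  | false => rfl
  | true => rw [pv_rel_header x hr] at h; exact absurd h (by simp)

-- skipping a Related block's content = dropping lines until the next header
lemma pv_skip (rc : List Char) : ∀ (lines : List (List Char)) (out : List (List Char)) (rep : Bool),
    pvProj (lines.foldl (pvStepA rc) (out, true, rep)) =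
    pvProj ((lines.dropWhile pvNotHeader).foldl (pvStepA rc) (out, false, rep)) := by
  intro lines
  induction lines with
  | nil => intro out rep; rfl
  | cons x xs ih =>
    intro out rep
    cases hx : PySem.Chars.startswith x "#".toList with
    | false =>
      have hnh : pvNotHeader x = true := by simp [pvNotHeader]; exact hx
      have hrel := pv_rel_false x hx
      have hstep : pvStepA rc (out, true, rep) x = (out, true, rep) := by
        unfold pvStepA; rw [hrel, hx]; simp
      simp only [List.foldl_cons, List.dropWhile_cons, hnh, if_true, hstep]
      exact ih out rep
    | true =>
      have hnh : pvNotHeader x = false := by simp [pvNotHeader]; exact hx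
      have hstep : pvStepA rc (out, true, rep) x = pvStepA rc (out, false, rep) x := by
        unfold pvStepA
        cases hrel : PySem.Chars.startswith x "## Related".toList
        · rw [hx]; simp
        · simp
      simp only [List.foldl_cons, List.dropWhile_cons, hnh, Bool.false_eq_true, if_false, hstep]

-- main invariant: A's scan from a clean state = B's recursive render, shifted by the
-- already-emitted lines and already-seen flag
lemma pv_main (rc : List Char) : ∀ (n : Nat) (lines : List (List Char)), lines.length ≤ n →
    ∀ (out : List (List Char)) (rep : Bool),
    pvProj (lines.foldl (pvStepA rc) (out, false, rep)) =
    (out ++ (pvRender rc lines).1, rep || (pvRender rc lines).2) := by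
  intro n
  induction n with
  | zero =>
    intro lines hlen out rep
    have : lines = [] := List.length_eq_zero_iff.mp (Nat.le_zero.mp hlen)
    subst this; simp [pvProj, pvRender]
  | succ n ih =>
    intro lines hlen out rep
    match lines with
    | [] => simp [pvProj, pvRender]
    | x :: xs =>
      have hxs : xs.length ≤ n := by simpa using Nat.succ_le_succ_iff.mp hlen
      cases hrel : PySem.Chars.startswith x "## Related".toList with
      | true =>
        have hstep : pvStepA rc (out, false, rep) x = (out ++ [rc], true, true) := by
          unfold pvStepA; rw [hrel]; simp
        have hrend : pvRender rc (x :: xs) =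
            (rc :: (pvRender rc (xs.dropWhile pvNotHeader)).1, true) := by
          rw [pvRender]; rw [hrel]; simp
        rw [List.foldl_cons, hstep, pv_skip rc xs (out ++ [rc]) true,
          ih (xs.dropWhile pvNotHeader) (le_trans (xs.length_dropWhile_le pvNotHeader) hxs)
            (out ++ [rc]) true, hrend]
        simp
      | false =>
        have hstep : pvStepA rc (out, false, rep) x = (out ++ [x], false, rep) := by
          unfold pvStepA; rw [hrel]; simp
        have hrend : pvRender rc (x :: xs) =
            (x :: (pvRender rc xs).1, (pvRender rc xs).2) := by
          rw [pvRender]; rw [hrel]; simp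
        rw [List.foldl_cons, hstep, ih xs hxs (out ++ [x]) rep, hrend]
        simp

-- A's match-on-getLast? blank-line rule = B's if-on-getLastD blank-line rule
lemma pv_finish (l : List (List Char)) :
    (match l.getLast? with
     | some x => if PySem.Chars.strip x ≠ [] then l ++ [[]] else l
     | none => l) =
    (if l ≠ [] ∧ PySem.Chars.strip (l.getLastD []) ≠ [] then l ++ [[]] else l) := by
  cases hl : l.getLast? with
  | none =>
    have : l = [] := List.getLast?_eq_none_iff.mp hl
    subst this; simp
  | some x =>
    have hne : l ≠ [] := by
      intro h; subst h; simp at hl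
    have hd : l.getLastD ([] : List Char) = x := by
      rw [List.getLastD_eq_getLast?, hl]; rfl
    simp only [hd, hne, ne_eq, not_false_eq_true, true_and]

-- ===== VERDICT (by name: the statement is the Claim_ definition above) =====
theorem write_related_section_spec : Claim_equal_write_related_section := by
  intro body rf _
  unfold Spec_write_related_section
  by_cases h : rf.isEmpty
  · simp only [write_related_section, write_related_section_alt, if_pos h]
  · simp only [write_related_section, write_related_section_alt, if_neg h]
    have key := pv_main
      ("## Related\n".toList ++ PySem.Chars.join "\n".toList
        (rf.map (fun f => "- [[".toList ++ f.toList ++ "]]".toList)))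
      (PySem.Chars.splitOn body.toList "\n".toList).length
      (PySem.Chars.splitOn body.toList "\n".toList) le_rfl [] false
    simp only [List.nil_append, Bool.false_or] at key
    have h1 := congrArg Prod.fst key
    have h2 := congrArg Prod.snd key
    simp only [pvProj] at h1 h2
    rw [h1, h2, pv_finish]
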